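-- pv_equiv track=rewrite | github.com/fahtinurai/TUBES_AKA | Program_Tubes_AKA_FINAL/Tubes_AKA/Tubes.py | cari_obat_rekursif
-- ===== SOURCE A (Python) =====
-- def cari_obat_rekursif(keyword, data, index=0, hasil=None):
--     """
--     Pencarian obat secara rekursif.
--
--     keyword: string yang dicari.
--     data: list dictionary data obat.
--     index: indeks saat ini dalam pencarian.
--     hasil: list untuk menyimpan hasil pencarian.
--     """
--     if hasil is None:
--         hasil = []
--
--     # Kondisi basis: jika indeks melebihi panjang data
--     if index >= len(data):
--         return hasil
--
--     # Cek apakah keyword ditemukan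
--     if keyword.lower() in data[index]["nama"].lower():
--         hasil.append(data[index])
--
--     # Rekursif dengan indeks berikutnya
--     return cari_obat_rekursif(keyword, data, index + 1, hasil)
-- ===== SOURCE B (Python) =====
-- def cari_obat_rekursif(keyword, data, index=0, hasil=None):
--     # Iterative re-implementation: one explicit loop from `index` to the end,
--     # appending matches to (and returning) the same hasil list.
--     if hasil is None:
--         hasil = []
--     kw = keyword.lower()
--     for i in range(index, len(data)):
--         if kw in data[i]["nama"].lower():
--             hasil.append(data[i])
--     return hasil
-- ===== Notes on version B (the rewrite author's own statement) =====
-- stated objective: simpler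
-- what changed: Replaces the tail recursion (one Python call frame per element, keyword.lower() recomputed every call) with a single explicit for-loop over range(index, len(data)) with the lowered keyword hoisted out; no recursion-depth limit.
-- outside the precondition, e.g. on cari_obat_rekursif('x', [{'dosis': '1'}], 0, None): A raises KeyError, B raises KeyError; on cari_obat_rekursif('x', [{'nama': 'a'}], -5, None): A raises IndexError, B raises IndexError
import Mathlib
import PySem

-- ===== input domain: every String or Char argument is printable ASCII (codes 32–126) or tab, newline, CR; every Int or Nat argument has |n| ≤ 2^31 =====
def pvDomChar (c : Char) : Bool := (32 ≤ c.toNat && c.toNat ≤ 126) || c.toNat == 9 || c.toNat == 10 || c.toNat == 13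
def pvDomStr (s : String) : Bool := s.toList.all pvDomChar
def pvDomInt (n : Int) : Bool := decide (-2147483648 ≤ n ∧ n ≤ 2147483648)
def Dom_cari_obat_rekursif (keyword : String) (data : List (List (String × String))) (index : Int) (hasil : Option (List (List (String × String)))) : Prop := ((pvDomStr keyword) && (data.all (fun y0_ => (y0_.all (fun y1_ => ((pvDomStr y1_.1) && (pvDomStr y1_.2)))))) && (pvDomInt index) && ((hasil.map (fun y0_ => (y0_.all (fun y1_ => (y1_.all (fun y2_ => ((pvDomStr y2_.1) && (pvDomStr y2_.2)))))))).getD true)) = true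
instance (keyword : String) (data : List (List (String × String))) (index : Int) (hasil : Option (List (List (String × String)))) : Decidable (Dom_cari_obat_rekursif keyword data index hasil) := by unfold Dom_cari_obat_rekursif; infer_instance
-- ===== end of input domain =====

-- B replaces A's tail recursion by a single explicit for-loop over range(index, len(data)) (simpler; no recursion depth limit).
-- A and B both append to a caller-supplied hasil list in place; the equivalence proved here is about the RETURN value.


-- ===== PORT A =====
-- A's recursion: base case index >= len(data), otherwise test data[index]["nama"], append, recurse with index+1.
-- data[index] uses PySem.List.pyGetD (Python wraparound; out-of-range = IndexError, excluded by Pre_);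
-- the "nama" lookup uses .lookup with default "" (a missing key = KeyError, excluded by Pre_).
def cariGoA (keyword : String) (data : List (List (String × String))) (index : Int) (hasil : List (List (String × String))) : List (List (String × String)) :=
  if _h : (data.length : Int) ≤ index then hasil
  else
    let d := PySem.List.pyGetD data index []
    let hasil' :=
      if PySem.Str.isIn (PySem.Str.lower keyword) (PySem.Str.lower ((List.lookup "nama" d).getD "")) then
        hasil ++ [d]
      else hasil
    cariGoA keyword data (index + 1) hasil'
  termination_by ((data.length : Int) - index).toNat
  decreasing_by omega

def cari_obat_rekursif (keyword : String) (data : List (List (String × String))) (index : Int) (hasil : Option (List (List (String × String)))) : List (List (String × String)) :=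
  cariGoA keyword data index (hasil.getD [])

-- ===== PORT B =====
-- B's loop: for i in range(index, len(data)): if kw in data[i]["nama"].lower(): hasil.append(data[i])
def cari_obat_rekursif_alt (keyword : String) (data : List (List (String × String))) (index : Int) (hasil : Option (List (List (String × String)))) : List (List (String × String)) :=
  let kw := PySem.Str.lower keyword
  (PySem.List.pyRange index (data.length : Int) 1).foldl
    (fun acc i =>
      let d := PySem.List.pyGetD data i []
      if PySem.Str.isIn kw (PySem.Str.lower ((List.lookup "nama" d).getD "")) then acc ++ [d] else acc)
    (hasil.getD [])

-- ===== PRECONDITION & SPEC =====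
-- Pre_ excludes exactly the inputs where the Python A raises: an index below -len(data) (IndexError via
-- Python's negative-index rule) and a visited dict without a "nama" key (KeyError). A negative index in
-- [-len, -1] wraps around in both programs and stays inside Pre_.
def Pre_cari_obat_rekursif (keyword : String) (data : List (List (String × String))) (index : Int) (hasil : Option (List (List (String × String)))) : Prop :=
  (data.length : Int) ≤ index ∨
    (-(data.length : Int) ≤ index ∧
      ∀ d ∈ data.drop (if index < 0 then 0 else index.toNat), (List.lookup "nama" d).isSome)
instance (keyword : String) (data : List (List (String × String))) (index : Int) (hasil : Option (List (List (String × String)))) : Decidable (Pre_cari_obat_rekursif keyword data index hasil) := by unfold Pre_cari_obat_rekursif; infer_instance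

def pvWitness_cari_obat_rekursif : String × (List (List (String × String))) × Int × (Option (List (List (String × String)))) :=
  ("pa", [[("nama", "Paracetamol")], [("nama", "Amoxicillin")]], 0, none)

def Spec_cari_obat_rekursif (keyword : String) (data : List (List (String × String))) (index : Int) (hasil : Option (List (List (String × String)))) (out : List (List (String × String))) : Prop := out = cari_obat_rekursif_alt keyword data index hasil
instance (keyword : String) (data : List (List (String × String))) (index : Int) (hasil : Option (List (List (String × String)))) (out : List (List (String × String))) : Decidable (Spec_cari_obat_rekursif keyword data index hasil out) := by unfold Spec_cari_obat_rekursif; infer_instance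

-- ===== CLAIM (what is proved, stated in full; the proofs are below) =====
def Claim_equal_cari_obat_rekursif : Prop := ∀ (keyword : String) (data : List (List (String × String))) (index : Int) (hasil : Option (List (List (String × String)))), Dom_cari_obat_rekursif keyword data index hasil → Pre_cari_obat_rekursif keyword data index hasil → Spec_cari_obat_rekursif keyword data index hasil (cari_obat_rekursif keyword data index hasil)

-- ===== LEMMAS AND PROOFS =====

-- A's recursion equals B's fold over range(index, len) whenever index ≥ -len (no IndexError possible).
theorem cariGoA_eq_foldl (keyword : String) (data : List (List (String × String))) :
    ∀ (n : Nat) (index : Int) (hasil : List (List (String × String))),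
      ((data.length : Int) - index).toNat = n → -(data.length : Int) ≤ index →
      cariGoA keyword data index hasil =
        (PySem.List.pyRange index (data.length : Int) 1).foldl
          (fun acc i =>
            let d := PySem.List.pyGetD data i []
            if PySem.Str.isIn (PySem.Str.lower keyword) (PySem.Str.lower ((List.lookup "nama" d).getD "")) then acc ++ [d] else acc)
          hasil := by
  intro n
  induction n with
  | zero =>
    intro index hasil hn hge
    have hle : (data.length : Int) ≤ index := by omega
    rw [cariGoA, dif_pos hle, PySem.List.pyRange_one_eq_nil hle, List.foldl_nil]
  | succ m ih =>
    intro index hasil hn hge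
    have hlt : index < (data.length : Int) := by omega
    rw [cariGoA, dif_neg (by omega), PySem.List.pyRange_one_cons hlt, List.foldl_cons]
    exact ih (index + 1) _ (by omega) (by omega)

-- ===== VERDICT (by name: the statement is the Claim_ definition above) =====
theorem cari_obat_rekursif_spec : Claim_equal_cari_obat_rekursif := by
  intro keyword data index hasil _hdom hpre
  unfold Spec_cari_obat_rekursif cari_obat_rekursif cari_obat_rekursif_alt
  have hge : -(data.length : Int) ≤ index := by
    rcases hpre with h | ⟨h, _⟩
    · have : (0 : Int) ≤ (data.length : Int) := by positivity
      omega
    · exact h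
  exact cariGoA_eq_foldl keyword data _ index (hasil.getD []) rfl hge
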